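-- pv_equiv track=rewrite | github.com/parkersullivan77/RSA-Encryption | RSA/transposition-encr.py | buildGroupGrid
-- ===== SOURCE A (Python) =====
-- def buildGroupGrid(groups):
--     grid = []
--     row = []
--     for i in range(len(groups)):
--         for j in range(len(groups[i])):
--             row.append(groups[i][j])
--         if (i % 2) != 0:
--             grid.append(row)
--             row = []
--     return grid
-- ===== SOURCE B (Python) =====
-- def buildGroupGrid(groups):
--     it = iter(groups)
--     return [a + b for a, b in zip(it, it)]
-- ===== Notes on version B (the rewrite author's own statement) =====
-- stated objective: idiomatic
-- what changed: Replaces the running row accumulator with odd-index flush by direct pairwise grouping (zip of one iterator with itself) and concatenating each pair into a row.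
import Mathlib
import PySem

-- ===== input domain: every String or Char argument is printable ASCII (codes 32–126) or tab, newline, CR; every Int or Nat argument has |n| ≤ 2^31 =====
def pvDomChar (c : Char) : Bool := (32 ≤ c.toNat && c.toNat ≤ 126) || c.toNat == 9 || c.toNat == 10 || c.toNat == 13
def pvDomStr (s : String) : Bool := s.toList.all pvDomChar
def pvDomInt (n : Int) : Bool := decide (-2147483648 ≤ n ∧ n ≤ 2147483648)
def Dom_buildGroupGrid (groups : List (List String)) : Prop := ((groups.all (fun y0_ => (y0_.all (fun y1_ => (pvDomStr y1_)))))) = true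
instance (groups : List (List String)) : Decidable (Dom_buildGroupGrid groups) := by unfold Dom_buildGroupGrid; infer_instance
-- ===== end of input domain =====

-- B replaces A's running-row accumulator with odd-index flush by direct pairwise
-- grouping (zip an iterator with itself) and concatenating each pair — idiomatic, same cost.


-- ===== PORT A =====
-- outer 'for i in range(len(groups))' as recursion over the list carrying the counter i;
-- inner 'for j in …: row.append(…)' as a fold appending each element of groups[i]
def buildGroupGridLoop (gs : List (List String)) (i : Nat)
    (grid : List (List String)) (row : List String) : List (List String) :=
  match gs with
  | [] => grid
  | g :: t =>
    let row := g.foldl (fun r x => r ++ [x]) row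
    if i % 2 ≠ 0 then buildGroupGridLoop t (i + 1) (grid ++ [row]) []
    else buildGroupGridLoop t (i + 1) grid row

def buildGroupGrid (groups : List (List String)) : List (List String) :=
  buildGroupGridLoop groups 0 [] []

-- ===== PORT B =====
-- 'zip(it, it)' pairs consecutive elements; the comprehension concatenates each pair
def pairUp (gs : List (List String)) : List (List String × List String) :=
  match gs with
  | a :: b :: t => (a, b) :: pairUp t
  | _ => []

def buildGroupGrid_alt (groups : List (List String)) : List (List String) :=
  (pairUp groups).map (fun p => p.1 ++ p.2)

-- ===== PRECONDITION & SPEC =====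
def Spec_buildGroupGrid (groups : List (List String)) (out : List (List String)) : Prop := out = buildGroupGrid_alt groups
instance (groups : List (List String)) (out : List (List String)) : Decidable (Spec_buildGroupGrid groups out) := by unfold Spec_buildGroupGrid; infer_instance

-- ===== CLAIM (what is proved, stated in full; the proofs are below) =====
def Claim_equal_buildGroupGrid : Prop := ∀ (groups : List (List String)), Dom_buildGroupGrid groups → Spec_buildGroupGrid groups (buildGroupGrid groups)

-- ===== LEMMAS AND PROOFS =====
theorem foldl_append_singleton (g : List String) (row : List String) :
    g.foldl (fun r x => r ++ [x]) row = row ++ g := by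
  induction g generalizing row with
  | nil => simp
  | cons a t ih => simp [List.foldl, ih]

theorem loop_eq (gs : List (List String)) (i : Nat) (grid : List (List String))
    (hi : i % 2 = 0) :
    buildGroupGridLoop gs i grid [] = grid ++ buildGroupGrid_alt gs := by
  match gs with
  | [] => simp [buildGroupGridLoop, buildGroupGrid_alt, pairUp]
  | [a] =>
    simp only [buildGroupGridLoop, foldl_append_singleton, hi, ne_eq, not_true_eq_false,
      if_false, buildGroupGrid_alt, pairUp, List.map_nil, List.append_nil]
  | a :: b :: t =>
    have h1 : (i + 1) % 2 ≠ 0 := by omega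
    have h2 : (i + 2) % 2 = 0 := by omega
    have ih := loop_eq t (i + 2) (grid ++ [a ++ b]) h2
    simp only [buildGroupGridLoop, foldl_append_singleton, List.nil_append, hi, ne_eq,
      not_true_eq_false, if_false, h1, not_false_eq_true, if_true, buildGroupGrid_alt,
      pairUp, List.map_cons] at ih ⊢
    rw [show i + 1 + 1 = i + 2 from rfl, ih]
    simp
termination_by gs.length

-- ===== VERDICT (by name: the statement is the Claim_ definition above) =====
theorem buildGroupGrid_spec : Claim_equal_buildGroupGrid := by
  intro groups _
  unfold Spec_buildGroupGrid buildGroupGrid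
  simpa using loop_eq groups 0 [] rfl
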